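-- pv_equiv track=rewrite | github.com/Tanmay-Patel-21/dsa | interviews/shreya1.py | calculate_difficulty_quotient
-- ===== SOURCE A (Python) =====
-- def is_hard_word(word):
--     vowels = "aeiouAEIOU"
--     consecutive_consonants_count = 0
--     consonants_count = 0
--
--     for char in word:
--         if char.isalpha():
--             if char not in vowels:
--                 consonants_count += 1
--                 consecutive_consonants_count += 1
--                 if consecutive_consonants_count == 3:
--                     return True
--             else:
--                 consecutive_consonants_count = 0
--
--     return consonants_count > len(word) - consonants_count
--
-- def calculate_difficulty_quotient(input_string):
--     words = input_string.split()
--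
--     hard_words = 0
--     easy_words = 0
--
--     for word in words:
--         if is_hard_word(word):
--             hard_words += 1
--         else:
--             easy_words += 1
--
--     difficulty_quotient = (5 * hard_words) - (2 * easy_words)
--     return difficulty_quotient
-- ===== SOURCE B (Python) =====
-- def calculate_difficulty_quotient(input_string):
--     # single streaming pass over the characters; no split(), no per-word helper
--     score = 0
--     maxrun = run = cons = wlen = 0
--     for ch in input_string + " ":
--         if ch.isspace():
--             if wlen:
--                 score += 5 if (maxrun >= 3 or 2 * cons > wlen) else -2
--                 maxrun = run = cons = wlen = 0
--         else:
--             wlen += 1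
--             if ch.isalpha():
--                 if ch.lower() in "aeiou":
--                     run = 0
--                 else:
--                     cons += 1
--                     run += 1
--                     if run > maxrun:
--                         maxrun = run
--     return score
-- ===== Notes on version B (the rewrite author's own statement) =====
-- stated objective: alternative
-- what changed: B replaces A's split-into-words plus per-word helper (with an early return on the third consecutive consonant) by a single streaming character pass over the whole string: one state machine (max consonant run, consonant count, word length) that flushes a word's +5/-2 contribution into the running score at each whitespace boundary, never materialising a word list or a word string.
import Mathlib
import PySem

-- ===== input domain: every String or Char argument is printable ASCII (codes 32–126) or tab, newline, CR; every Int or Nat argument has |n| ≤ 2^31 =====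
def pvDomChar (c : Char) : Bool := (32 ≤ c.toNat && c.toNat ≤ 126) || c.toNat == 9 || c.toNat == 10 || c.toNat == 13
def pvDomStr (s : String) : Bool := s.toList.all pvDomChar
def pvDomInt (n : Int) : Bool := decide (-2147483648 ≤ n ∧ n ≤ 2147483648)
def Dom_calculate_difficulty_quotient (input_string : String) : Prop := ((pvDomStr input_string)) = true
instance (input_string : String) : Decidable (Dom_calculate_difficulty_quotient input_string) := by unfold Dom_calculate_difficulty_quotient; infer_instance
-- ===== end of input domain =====

-- B replaces A's split()-into-words plus per-word helper by one streaming character pass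
-- that flushes each word's score at a whitespace boundary; an alternative of the same linear cost.

-- ===== PORT A =====
def pvVowels : List Char := "aeiouAEIOU".toList

-- the for-loop of A's is_hard_word: early `return True` becomes returning `true`;
-- `char not in vowels` on a single character is `¬ PySem.Chars.isIn [char] vowels`
def is_hard_word_loop (wlen : Int) : List Char → Int → Int → Bool
  | [], _, cc => decide (cc > wlen - cc)
  | ch :: rest, ccc, cc =>
    if PySem.Chars.isalpha ch then
      if ¬ (PySem.Chars.isIn [ch] pvVowels = true) then
        -- consonants_count += 1; consecutive_consonants_count += 1; if == 3: return True
        (if ccc + 1 == 3 then true else is_hard_word_loop wlen rest (ccc + 1) (cc + 1))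
      else is_hard_word_loop wlen rest 0 cc
    else is_hard_word_loop wlen rest ccc cc

def is_hard_word (word : String) : Bool :=
  is_hard_word_loop (word.toList.length : Int) word.toList 0 0

def calculate_difficulty_quotient (input_string : String) : Int :=
  let words := PySem.Str.split₀ input_string
  let p := words.foldl
    (fun (p : Int × Int) w => if is_hard_word w then (p.1 + 1, p.2) else (p.1, p.2 + 1)) (0, 0)
  5 * p.1 - 2 * p.2

-- ===== PORT B =====
-- the loop state of Source B: score, maxrun, run, cons, wlen
structure PvSt where
  score : Int
  maxrun : Int
  run : Int
  cons : Int
  wlen : Int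
deriving Repr, DecidableEq

-- one iteration of Source B's `for ch in input_string + " "`
def pvStep (st : PvSt) (ch : Char) : PvSt :=
  if PySem.Chars.isspace ch then
    if st.wlen ≠ 0 then
      { score := st.score + (if 3 ≤ st.maxrun ∨ 2 * st.cons > st.wlen then 5 else -2),
        maxrun := 0, run := 0, cons := 0, wlen := 0 }
    else st
  else
    let st1 : PvSt := { st with wlen := st.wlen + 1 }
    if PySem.Chars.isalpha ch then
      if PySem.Chars.lowerChar ch ∈ "aeiou".toList then { st1 with run := 0 }
      else
        let run := st1.run + 1
        { st1 with cons := st1.cons + 1, run := run,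
                   maxrun := if run > st1.maxrun then run else st1.maxrun }
    else st1

def calculate_difficulty_quotient_alt (input_string : String) : Int :=
  ((input_string.toList ++ [' ']).foldl pvStep
    { score := 0, maxrun := 0, run := 0, cons := 0, wlen := 0 }).score

-- ===== PRECONDITION & SPEC =====
def Spec_calculate_difficulty_quotient (input_string : String) (out : Int) : Prop := out = calculate_difficulty_quotient_alt input_string
instance (input_string : String) (out : Int) : Decidable (Spec_calculate_difficulty_quotient input_string out) := by unfold Spec_calculate_difficulty_quotient; infer_instance

-- ===== CLAIM (what is proved, stated in full; the proofs are below) =====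
def Claim_equal_calculate_difficulty_quotient : Prop := ∀ (input_string : String), Dom_calculate_difficulty_quotient input_string → Spec_calculate_difficulty_quotient input_string (calculate_difficulty_quotient input_string)

-- ===== LEMMAS AND PROOFS =====

-- the word-level part of B's state, as a standalone step function (maxrun, run, cons, wlen)
def pvStepW (w : Int × Int × Int × Int) (ch : Char) : Int × Int × Int × Int :=
  if PySem.Chars.isalpha ch then
    if PySem.Chars.lowerChar ch ∈ "aeiou".toList then (w.1, 0, w.2.2.1, w.2.2.2 + 1)
    else ((if w.2.1 + 1 > w.1 then w.2.1 + 1 else w.1), w.2.1 + 1, w.2.2.1 + 1, w.2.2.2 + 1)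
  else (w.1, w.2.1, w.2.2.1, w.2.2.2 + 1)

def pvWordSt (w : List Char) : Int × Int × Int × Int := w.foldl pvStepW (0, 0, 0, 0)

def pvHardC (w : List Char) : Bool :=
  decide (3 ≤ (pvWordSt w).1 ∨ 2 * (pvWordSt w).2.2.1 > (w.length : Int))

def pvScoreW (w : List Char) : Int := if pvHardC w then 5 else -2

def pvMkSt (S : Int) (w : Int × Int × Int × Int) : PvSt :=
  { score := S, maxrun := w.1, run := w.2.1, cons := w.2.2.1, wlen := w.2.2.2 }

lemma pvStep_nonspace (S : Int) (w : Int × Int × Int × Int) (ch : Char)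
    (hc : PySem.Chars.isspace ch = false) :
    pvStep (pvMkSt S w) ch = pvMkSt S (pvStepW w ch) := by
  obtain ⟨m, r, k, l⟩ := w
  simp only [pvStep, pvStepW, pvMkSt, hc, Bool.false_eq_true, if_false]
  split_ifs <;> rfl

lemma pvStepW_wlen (w : Int × Int × Int × Int) (ch : Char) :
    (pvStepW w ch).2.2.2 = w.2.2.2 + 1 := by
  simp only [pvStepW]; split_ifs <;> rfl

lemma pvFold_wlen (cs : List Char) : ∀ (w : Int × Int × Int × Int),
    (cs.foldl pvStepW w).2.2.2 = w.2.2.2 + (cs.length : Int) := by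
  induction cs with
  | nil => intro w; simp
  | cons c rest ih =>
    intro w
    rw [List.foldl_cons, ih, pvStepW_wlen, List.length_cons]
    push_cast; ring

lemma pvWordSt_wlen (cs : List Char) : (pvWordSt cs).2.2.2 = (cs.length : Int) := by
  rw [pvWordSt, pvFold_wlen]; ring

lemma pvStepW_maxrun_mono (w : Int × Int × Int × Int) (ch : Char) :
    w.1 ≤ (pvStepW w ch).1 := by
  simp only [pvStepW]; split_ifs <;> omega

lemma pvFold_maxrun_mono (cs : List Char) : ∀ (w : Int × Int × Int × Int),
    w.1 ≤ (cs.foldl pvStepW w).1 := by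
  induction cs with
  | nil => intro w; simp
  | cons c rest ih =>
    intro w
    exact le_trans (pvStepW_maxrun_mono w c) (ih (pvStepW w c))

-- a single alpha character is in A's vowel table iff its lowercase form is a vowel letter
lemma pv_vowel_char (c : Char) (h : PySem.Chars.isalpha c = true) :
    (PySem.Chars.isIn [c] pvVowels = true) ↔ (PySem.Chars.lowerChar c ∈ "aeiou".toList) := by
  have hb : 65 ≤ c.toNat ∧ c.toNat ≤ 90 ∨ 97 ≤ c.toNat ∧ c.toNat ≤ 122 := by
    simp only [PySem.Chars.isalpha, PySem.Chars.isupper, PySem.Chars.islower,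
      Bool.or_eq_true, Bool.and_eq_true, decide_eq_true_eq, Char.le_def] at h
    rcases h with ⟨h1, h2⟩ | ⟨h1, h2⟩
    · left; exact ⟨h1, h2⟩
    · right; exact ⟨h1, h2⟩
  have hc : Char.ofNat c.toNat = c := Char.ofNat_toNat c
  rcases hb with ⟨h1, h2⟩ | ⟨h1, h2⟩
  · obtain ⟨n, h1, h2, rfl⟩ : ∃ n, 65 ≤ n ∧ n ≤ 90 ∧ c = Char.ofNat n :=
      ⟨c.toNat, h1, h2, hc.symm⟩
    interval_cases n <;> decide
  · obtain ⟨n, h1, h2, rfl⟩ : ∃ n, 97 ≤ n ∧ n ≤ 122 ∧ c = Char.ofNat n :=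
      ⟨c.toNat, h1, h2, hc.symm⟩
    interval_cases n <;> decide

-- main per-word invariant: A's early-returning loop equals B's max-run test
lemma pv_loop_inv (wl : Int) (cs : List Char) :
    ∀ (m r k l : Int), 0 ≤ r → r ≤ m → m < 3 →
      is_hard_word_loop wl cs r k
        = decide (3 ≤ (cs.foldl pvStepW (m, r, k, l)).1
            ∨ 2 * (cs.foldl pvStepW (m, r, k, l)).2.2.1 > wl) := by
  induction cs with
  | nil =>
    intro m r k l h0 hrm hm3
    simp only [is_hard_word_loop, List.foldl_nil, decide_eq_decide]
    omega
  | cons c rest ih =>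
    intro m r k l h0 hrm hm3
    rw [List.foldl_cons]
    by_cases ha : PySem.Chars.isalpha c = true
    · by_cases hv : PySem.Chars.lowerChar c ∈ "aeiou".toList
      · -- vowel: A resets the consecutive counter, B resets run
        have hA : PySem.Chars.isIn [c] pvVowels = true := (pv_vowel_char c ha).mpr hv
        have hs : pvStepW (m, r, k, l) c = (m, 0, k, l + 1) := by
          simp only [pvStepW]; rw [if_pos ha, if_pos hv]
        rw [hs, is_hard_word_loop, if_pos ha, if_neg (by simp [hA])]
        exact ih m 0 k (l + 1) le_rfl (le_trans h0 hrm) hm3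
      · -- consonant
        have hA : ¬ (PySem.Chars.isIn [c] pvVowels = true) := fun h => hv ((pv_vowel_char c ha).mp h)
        have hs : pvStepW (m, r, k, l) c
            = ((if r + 1 > m then r + 1 else m), r + 1, k + 1, l + 1) := by
          simp only [pvStepW]; rw [if_pos ha, if_neg hv]
        rw [hs, is_hard_word_loop, if_pos ha, if_pos hA]
        by_cases h3 : r + 1 = 3
        · -- A returns early; B's maxrun has reached 3 and never decreases
          rw [if_pos (by simpa using h3)]
          have hm' : (if r + 1 > m then r + 1 else m) = 3 := by
            rw [if_pos (by omega)]; exact h3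
          rw [hm']
          have hmono := pvFold_maxrun_mono rest (3, r + 1, k + 1, l + 1)
          symm
          rw [decide_eq_true_iff]
          exact Or.inl hmono
        · rw [if_neg (by simpa using h3)]
          have hm' : r + 1 ≤ (if r + 1 > m then r + 1 else m) := by split_ifs <;> omega
          have hm3' : (if r + 1 > m then r + 1 else m) < 3 := by split_ifs <;> omega
          exact ih _ _ _ _ (by omega) hm' hm3'
    · have hs : pvStepW (m, r, k, l) c = (m, r, k, l + 1) := by
        simp [pvStepW, ha]
      rw [hs, is_hard_word_loop, if_neg ha]
      exact ih m r k (l + 1) h0 hrm hm3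

-- per word: A's is_hard_word equals B's hardness test on the character list
lemma pv_is_hard_eq (w : List Char) : is_hard_word (String.ofList w) = pvHardC w := by
  rw [is_hard_word, String.toList_ofList, pvHardC, pvWordSt]
  exact pv_loop_inv _ w 0 0 0 0 le_rfl le_rfl (by norm_num)

-- split₀.go with a nonempty accumulator
lemma pv_go_acc (cs : List Char) : ∀ (cur : List Char) (acc : List (List Char)),
    PySem.Chars.split₀.go cs cur acc = acc.reverse ++ PySem.Chars.split₀.go cs cur [] := by
  induction cs with
  | nil =>
    intro cur acc
    simp only [PySem.Chars.split₀.go]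
    by_cases hc : cur.isEmpty = true <;> simp [hc]
  | cons c rest ih =>
    intro cur acc
    simp only [PySem.Chars.split₀.go]
    by_cases hs : PySem.Chars.isspace c = true
    · by_cases hc : cur.isEmpty = true
      · simp only [hs, hc, if_true]
        exact ih [] acc
      · simp only [hs, hc, if_true, if_false, Bool.false_eq_true]
        rw [ih [] (cur.reverse :: acc), ih [] [cur.reverse]]
        simp
    · simp only [hs, Bool.false_eq_true, if_false]
      exact ih (c :: cur) acc

-- a whitespace character flushes a nonempty current word: its score is added, the word state resets
lemma pv_flush (S : Int) (cur : List Char) (hc : cur ≠ []) (c : Char)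
    (hs : PySem.Chars.isspace c = true) :
    pvStep (pvMkSt S (pvWordSt cur.reverse)) c
      = pvMkSt (S + pvScoreW cur.reverse) (0, 0, 0, 0) := by
  rcases hww : pvWordSt cur.reverse with ⟨m, r, k, l⟩
  have hwl : l = (cur.reverse.length : Int) := by
    have h := pvWordSt_wlen cur.reverse
    rw [hww] at h
    exact h
  subst hwl
  have hl : ((cur.reverse.length : Int)) ≠ 0 := by simp [hc]
  simp only [pvScoreW, pvHardC, hww, pvStep, pvMkSt, decide_eq_true_eq]
  rw [if_pos hs, if_pos hl]
  rfl

-- streaming invariant: folding B's step over cs ++ [' '] from a mid-word state scores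
-- exactly the words that split₀.go would still produce
lemma pv_go_inv (cs : List Char) : ∀ (cur : List Char) (S : Int),
    ((cs ++ [' ']).foldl pvStep (pvMkSt S (pvWordSt cur.reverse))).score
      = S + ((PySem.Chars.split₀.go cs cur []).map pvScoreW).sum := by
  induction cs with
  | nil =>
    intro cur S
    rw [List.nil_append, List.foldl_cons, List.foldl_nil]
    by_cases hc : cur = []
    · subst hc
      have hsp : PySem.Chars.isspace ' ' = true := by decide
      simp [pvStep, pvMkSt, pvWordSt, hsp, PySem.Chars.split₀.go]
    · rw [pv_flush S cur hc ' ' (by decide)]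
      have hgo : PySem.Chars.split₀.go [] cur [] = [cur.reverse] := by
        simp [PySem.Chars.split₀.go, hc]
      rw [hgo]
      simp [pvMkSt]
  | cons c rest ih =>
    intro cur S
    rw [List.cons_append, List.foldl_cons]
    by_cases hs : PySem.Chars.isspace c = true
    · by_cases hc : cur = []
      · subst hc
        have hst : pvStep (pvMkSt S (pvWordSt ([] : List Char).reverse)) c
            = pvMkSt S (pvWordSt ([] : List Char).reverse) := by
          simp [pvStep, pvMkSt, pvWordSt, hs]
        rw [hst]
        have hgo : PySem.Chars.split₀.go (c :: rest) [] []
            = PySem.Chars.split₀.go rest [] [] := by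
          simp [PySem.Chars.split₀.go, hs]
        rw [hgo]
        exact ih [] S
      · rw [pv_flush S cur hc c hs]
        have hst : pvMkSt (S + pvScoreW cur.reverse) (0, 0, 0, 0)
            = pvMkSt (S + pvScoreW cur.reverse) (pvWordSt ([] : List Char).reverse) := rfl
        rw [hst, ih [] (S + pvScoreW cur.reverse)]
        have hgo : PySem.Chars.split₀.go (c :: rest) cur []
            = PySem.Chars.split₀.go rest [] [cur.reverse] := by
          simp [PySem.Chars.split₀.go, hs, hc]
        rw [hgo, pv_go_acc rest [] [cur.reverse]]
        simp only [List.reverse_cons, List.reverse_nil, List.nil_append, List.map_append,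
          List.map_cons, List.map_nil, List.sum_append, List.sum_cons, List.sum_nil]
        ring
    · have hns : PySem.Chars.isspace c = false := by simpa using hs
      rw [pvStep_nonspace S _ c hns]
      have hstep : pvStepW (pvWordSt cur.reverse) c = pvWordSt ((c :: cur).reverse) := by
        simp [pvWordSt, List.reverse_cons, List.foldl_append]
      rw [hstep]
      have hgo : PySem.Chars.split₀.go (c :: rest) cur []
          = PySem.Chars.split₀.go rest (c :: cur) [] := by
        simp [PySem.Chars.split₀.go, hns]
      rw [hgo]
      exact ih (c :: cur) S

-- A's outer fold, rewritten as a sum of per-word scores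
lemma pv_fold_score (ws : List (List Char)) : ∀ (h e : Int),
    (5 : Int) * ((ws.map String.ofList).foldl
        (fun (p : Int × Int) w => if is_hard_word w then (p.1 + 1, p.2) else (p.1, p.2 + 1)) (h, e)).1
      - 2 * ((ws.map String.ofList).foldl
        (fun (p : Int × Int) w => if is_hard_word w then (p.1 + 1, p.2) else (p.1, p.2 + 1)) (h, e)).2
      = 5 * h - 2 * e + (ws.map pvScoreW).sum := by
  induction ws with
  | nil => intro h e; simp
  | cons w rest ih =>
    intro h e
    rw [List.map_cons, List.foldl_cons, List.map_cons, List.sum_cons]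
    rw [pv_is_hard_eq w]
    cases hw : pvHardC w with
    | true => rw [if_pos rfl, ih]; simp only [pvScoreW, hw, if_pos]; ring
    | false => rw [if_neg (by simp), ih]; simp only [pvScoreW, hw, Bool.false_eq_true, if_false]; ring

-- ===== VERDICT (by name: the statement is the Claim_ definition above) =====
theorem calculate_difficulty_quotient_spec : Claim_equal_calculate_difficulty_quotient := by
  intro s _
  unfold Spec_calculate_difficulty_quotient
  simp only [calculate_difficulty_quotient, calculate_difficulty_quotient_alt]
  have hB : ({ score := 0, maxrun := 0, run := 0, cons := 0, wlen := 0 } : PvSt)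
      = pvMkSt 0 (pvWordSt ([] : List Char).reverse) := rfl
  rw [hB, pv_go_inv s.toList [] 0]
  have hA : PySem.Str.split₀ s = (PySem.Chars.split₀ s.toList).map String.ofList := rfl
  rw [hA, pv_fold_score (PySem.Chars.split₀ s.toList) 0 0]
  have hgo : PySem.Chars.split₀ s.toList = PySem.Chars.split₀.go s.toList [] [] := rfl
  rw [hgo]
  ring
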